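-- pv_equiv track=rewrite | github.com/Kurpilyansky/AoC2020 | 14/14.py | get_indices
-- ===== SOURCE A (Python) =====
-- def get_indices(b, mask):
--   bits = []
--   for i in range(len(mask)):
--     if mask[i] == 'X':
--       bits.append(i)
--       if b & (1 << i):
--         b -= (1 << i)
--     elif mask[i] == '1':
--       if (b & (1 << i)) == 0:
--         b += (1 << i)
--
--   for a in range(1 << len(bits)):
--     c = b
--     for i in range(len(bits)):
--       if a & (1 << i):
--         c += (1 << bits[i])
--     yield c
-- ===== SOURCE B (Python) =====
-- def get_indices(b, mask):
--   # One pass over the mask: maintain the list of all floating offsets by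
--   # doubling it at each 'X' (appending shifted copies), instead of A's
--   # per-combination inner loop over the bit positions.
--   base = b
--   outs = [0]
--   for i, ch in enumerate(mask):
--     if ch == 'X':
--       p = 1 << i
--       if base & p:
--         base -= p
--       outs = outs + [o + p for o in outs]
--     elif ch == '1':
--       p = 1 << i
--       if not (base & p):
--         base += p
--   for o in outs:
--     yield base + o
-- ===== Notes on version B (the rewrite author's own statement) =====
-- stated objective: alternative
-- what changed: Instead of enumerating all 2^k floating-bit combinations and re-summing the k masked bit values for each one, B builds the list of offsets once in a single pass over the mask by doubling it at every 'X' (appending copies shifted by that bit), then yields base+offset.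
import Mathlib
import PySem

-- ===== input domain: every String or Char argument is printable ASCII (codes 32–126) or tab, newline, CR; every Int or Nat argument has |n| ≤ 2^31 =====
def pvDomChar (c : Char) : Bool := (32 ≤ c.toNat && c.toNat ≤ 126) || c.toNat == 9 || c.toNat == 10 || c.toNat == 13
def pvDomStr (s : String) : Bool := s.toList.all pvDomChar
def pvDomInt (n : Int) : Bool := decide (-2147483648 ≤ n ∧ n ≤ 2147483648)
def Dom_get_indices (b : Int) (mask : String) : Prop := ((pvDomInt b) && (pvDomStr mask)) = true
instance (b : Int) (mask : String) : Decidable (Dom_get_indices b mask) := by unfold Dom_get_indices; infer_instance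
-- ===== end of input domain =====

-- B builds the offset list once, doubling it at each 'X' of a single mask pass,
-- instead of A's per-combination inner summation loop; both Pythons are generators,
-- equivalence is about the yielded sequence as a list.

-- Python's `1 << i` for a nonnegative position i (used by both ports).
def pvPow (i : Nat) : Int := (1:Int) <<< i

-- ===== PORT A =====
def get_indices (b : Int) (mask : String) : List Int :=
  let st := mask.toList.zipIdx.foldl
    (fun (st : List Nat × Int) (p : Char × Nat) =>
      if p.1 = 'X' then
        (st.1 ++ [p.2],
         if PySem.Int.band st.2 (pvPow p.2) ≠ 0 then st.2 - pvPow p.2 else st.2)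
      else if p.1 = '1' then
        (st.1, if PySem.Int.band st.2 (pvPow p.2) = 0 then st.2 + pvPow p.2 else st.2)
      else st)
    ([], b)
  (PySem.List.pyRange 0 (pvPow st.1.length) 1).foldl
    (fun out a =>
      out ++ [st.1.zipIdx.foldl
        (fun c (q : Nat × Nat) =>
          if PySem.Int.band a (pvPow q.2) ≠ 0 then c + pvPow q.1 else c)
        st.2])
    []

-- ===== PORT B =====
def get_indices_alt (b : Int) (mask : String) : List Int :=
  let st := mask.toList.zipIdx.foldl
    (fun (st : Int × List Int) (p : Char × Nat) =>
      if p.1 = 'X' then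
        ((if PySem.Int.band st.1 (pvPow p.2) ≠ 0 then st.1 - pvPow p.2 else st.1),
         st.2 ++ st.2.map (· + pvPow p.2))
      else if p.1 = '1' then
        (if PySem.Int.band st.1 (pvPow p.2) = 0 then (st.1 + pvPow p.2, st.2) else st)
      else st)
    (b, [0])
  st.2.map (fun o => st.1 + o)

-- ===== PRECONDITION & SPEC =====
def Spec_get_indices (b : Int) (mask : String) (out : List Int) : Prop := out = get_indices_alt b mask
instance (b : Int) (mask : String) (out : List Int) : Decidable (Spec_get_indices b mask out) := by unfold Spec_get_indices; infer_instance

-- ===== CLAIM (what is proved, stated in full; the proofs are below) =====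
def Claim_equal_get_indices : Prop := ∀ (b : Int) (mask : String), Dom_get_indices b mask → Spec_get_indices b mask (get_indices b mask)

-- ===== LEMMAS AND PROOFS =====

/-- The offset list B maintains, as a function of A's list of floating-bit positions. -/
def pvD (bits : List Nat) : List Int :=
  bits.foldl (fun os j => os ++ os.map (· + pvPow j)) [0]

/-- A's inner loop: add to `b2` the value of every floating bit set in `a`. -/
def pvInner (bits : List Nat) (b2 : Int) (a : Int) : Int :=
  bits.zipIdx.foldl
    (fun c (q : Nat × Nat) =>
      if PySem.Int.band a (pvPow q.2) ≠ 0 then c + pvPow q.1 else c)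
    b2

theorem pvShift (k : Nat) : pvPow k = ((2 ^ k : Nat) : Int) := by
  simp [pvPow, Int.shiftLeft_eq]

theorem pvD_snoc (bits : List Nat) (j : Nat) :
    pvD (bits ++ [j]) = pvD bits ++ (pvD bits).map (· + pvPow j) := by
  simp [pvD, List.foldl_append]

theorem pvTest (n i : Nat) :
    (PySem.Int.band (↑n) (pvPow i) ≠ 0) ↔ n.testBit i = true := by
  rw [pvShift, PySem.Int.band_natCast, Nat.and_two_pow]
  cases h : n.testBit i <;> simp

theorem pvInner_snoc (bits : List Nat) (j : Nat) (b2 a : Int) :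
    pvInner (bits ++ [j]) b2 a =
      if PySem.Int.band a (pvPow bits.length) ≠ 0
      then pvInner bits b2 a + pvPow j else pvInner bits b2 a := by
  simp [pvInner, List.zipIdx_append, List.foldl_append]

theorem pvInner_congr (bits : List Nat) (b2 : Int) (m n : Nat)
    (h : ∀ i < bits.length, m.testBit i = n.testBit i) :
    pvInner bits b2 ↑m = pvInner bits b2 ↑n := by
  unfold pvInner
  apply PySem.List.foldl_congr_mem
  intro acc x hx
  rcases x with ⟨x1, x2⟩
  have hlt : x2 < bits.length := by
    have := List.mem_zipIdx hx
    omega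
  have hiff : (PySem.Int.band (↑m) (pvPow x2) ≠ 0) ↔
      (PySem.Int.band (↑n) (pvPow x2) ≠ 0) := by
    rw [pvTest, pvTest, h x2 hlt]
  exact if_congr hiff rfl rfl

theorem pvMap (bits : List Nat) (b2 : Int) :
    (List.range (2 ^ bits.length)).map (fun (n : Nat) => pvInner bits b2 (n : Int))
      = (pvD bits).map (fun o => b2 + o) := by
  induction bits using List.reverseRecOn with
  | nil =>
      simp [pvInner, pvD]
  | append_singleton bits j ih =>
      have hlen : (bits ++ [j]).length = bits.length + 1 := by simp
      have hpow : 2 ^ (bits.length + 1) = 2 ^ bits.length + 2 ^ bits.length := by ring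
      rw [hlen, hpow, List.range_add, List.map_append, List.map_map]
      have hfst : (List.range (2 ^ bits.length)).map (fun (n : Nat) => pvInner (bits ++ [j]) b2 (n : Int))
          = (List.range (2 ^ bits.length)).map (fun (n : Nat) => pvInner bits b2 (n : Int)) := by
        apply List.map_congr_left
        intro n hn
        have hn' : n < 2 ^ bits.length := List.mem_range.mp hn
        rw [pvInner_snoc]
        have hfalse : ¬ (PySem.Int.band (↑n) (pvPow bits.length) ≠ 0) := by
          rw [pvTest, Nat.testBit_eq_false_of_lt hn']
          simp
        simp [hfalse]
      have hsnd : (List.range (2 ^ bits.length)).map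
            ((fun (n : Nat) => pvInner (bits ++ [j]) b2 (n : Int)) ∘ fun x => 2 ^ bits.length + x)
          = (List.range (2 ^ bits.length)).map (fun (n : Nat) => pvInner bits b2 (n : Int) + pvPow j) := by
        apply List.map_congr_left
        intro n hn
        have hn' : n < 2 ^ bits.length := List.mem_range.mp hn
        simp only [Function.comp]
        rw [pvInner_snoc]
        have htb : (2 ^ bits.length + n).testBit bits.length = true := by
          rw [Nat.testBit_two_pow_add_eq, Nat.testBit_eq_false_of_lt hn']
          rfl
        have hc : (PySem.Int.band (↑(2 ^ bits.length + n)) (pvPow bits.length) ≠ 0) := by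
          rw [pvTest]; exact htb
        rw [if_pos hc]
        have hsame : pvInner bits b2 ↑(2 ^ bits.length + n) = pvInner bits b2 ↑n := by
          apply pvInner_congr
          intro i hi
          exact Nat.testBit_two_pow_add_gt hi n
        rw [hsame]
      rw [hfst, hsnd, pvD_snoc, List.map_append, List.map_map, ih,
          show (fun (n : Nat) => pvInner bits b2 (n : Int) + pvPow j)
              = ((· + pvPow j) ∘ (fun (n : Nat) => pvInner bits b2 (n : Int))) from rfl,
          ← List.map_map, ih, List.map_map]
      congr 1
      apply List.map_congr_left
      intro o _
      simp [Function.comp]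
      ring

theorem pvFirst (ps : List (Char × Nat)) (bits : List Nat) (b : Int) :
    ps.foldl
      (fun (st : Int × List Int) (p : Char × Nat) =>
        if p.1 = 'X' then
          ((if PySem.Int.band st.1 (pvPow p.2) ≠ 0 then st.1 - pvPow p.2 else st.1),
           st.2 ++ st.2.map (· + pvPow p.2))
        else if p.1 = '1' then
          (if PySem.Int.band st.1 (pvPow p.2) = 0 then (st.1 + pvPow p.2, st.2) else st)
        else st)
      (b, pvD bits)
    = ((ps.foldl
        (fun (st : List Nat × Int) (p : Char × Nat) =>
          if p.1 = 'X' then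
            (st.1 ++ [p.2],
             if PySem.Int.band st.2 (pvPow p.2) ≠ 0 then st.2 - pvPow p.2 else st.2)
          else if p.1 = '1' then
            (st.1, if PySem.Int.band st.2 (pvPow p.2) = 0 then st.2 + pvPow p.2 else st.2)
          else st)
        (bits, b)).2,
       pvD ((ps.foldl
        (fun (st : List Nat × Int) (p : Char × Nat) =>
          if p.1 = 'X' then
            (st.1 ++ [p.2],
             if PySem.Int.band st.2 (pvPow p.2) ≠ 0 then st.2 - pvPow p.2 else st.2)
          else if p.1 = '1' then
            (st.1, if PySem.Int.band st.2 (pvPow p.2) = 0 then st.2 + pvPow p.2 else st.2)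
          else st)
        (bits, b)).1)) := by
  induction ps generalizing bits b with
  | nil => rfl
  | cons p ps ih =>
      rcases p with ⟨c, i⟩
      by_cases hx : c = 'X'
      · simp only [List.foldl_cons, hx]
        rw [← pvD_snoc]
        exact ih (bits ++ [i]) _

      · by_cases h1 : c = '1'
        · by_cases hb : PySem.Int.band b (pvPow i) = 0
          · simp only [List.foldl_cons]
            simp only [if_neg hx, if_pos h1, if_pos hb]
            exact ih bits _
          · simp only [List.foldl_cons]
            simp only [if_neg hx, if_pos h1, if_neg hb]
            exact ih bits b
        · simp only [List.foldl_cons, if_neg hx, if_neg h1]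
          exact ih bits b

-- ===== VERDICT (by name: the statement is the Claim_ definition above) =====
theorem get_indices_spec : Claim_equal_get_indices := by
  intro b mask _
  show get_indices b mask = get_indices_alt b mask
  simp only [get_indices, get_indices_alt]
  rw [show ((b, [0]) : Int × List Int) = (b, pvD []) from rfl,
      pvFirst mask.toList.zipIdx [] b]
  rw [pvShift, PySem.List.pyRange_zero_nat,
      PySem.List.foldl_append_singleton_eq_map, List.map_map]
  exact pvMap _ _
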